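-- pv_equiv track=rewrite | github.com/psunwoo/TDC_Calibration | src_class/utils.py | predict_tapped
-- ===== SOURCE A (Python) =====
-- from bisect import insort
--
-- def predict_tapped(perceived_sequence, true_sequence, offset = 1):
--   """
--   - Input for this func: perceived sequence + true sequence of taps
--
--   - Output for this func: tapped bins based on the two input sequences
--   """
--   def continuous_check(index_list):
--     if index_list[0] != 0:
--       return
--
--     for i in range(1, len(index_list)):
--       if index_list[i] != index_list[i-1] + 1:
--         return index_list[i-1] + offset
--     return index_list[-1] + offset if len(index_list) else None
--
--   sequence_index = []
--   tapped = set()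
--   index_dict = {number: index for index, number in enumerate(perceived_sequence)} # Better to compute the index dictionary all at once; index function is costly
--
--   for number in true_sequence:
--     insort(sequence_index, index_dict[number]) # Comparing the value: O(log k), inserting: O(k); full sorting would be O(k log k), since it essentially does what insort does for every element, and when updating the sorting repeatedly is desired, do insort
--     index = continuous_check(sequence_index)
--     if index:
--       tapped.add(index)
--   return tuple(sorted(tapped))
-- ===== SOURCE B (Python) =====
-- def predict_tapped(perceived_sequence, true_sequence, offset=1):
--   """
--   Incremental re-implementation: instead of re-sorting and re-scanning the
--   index list after every insertion, keep a count dict, the smallest missing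
--   index (mex) and the smallest duplicated index, from which the end of the
--   contiguous prefix run is read off in O(1) per step.
--   """
--   index_dict = {number: index for index, number in enumerate(perceived_sequence)}
--   cnt = {}
--   mex = 0
--   sdup = None
--   tapped = set()
--   for number in true_sequence:
--     i = index_dict[number]
--     c = cnt.get(i, 0) + 1
--     cnt[i] = c
--     if c == 2 and (sdup is None or i < sdup):
--       sdup = i
--     while cnt.get(mex, 0):
--       mex += 1
--     if cnt.get(0, 0):
--       base = mex - 1 if sdup is None else min(mex - 1, sdup)
--       t = base + offset
--       if t:
--         tapped.add(t)
--   return tuple(sorted(tapped))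
-- ===== Notes on version B (the rewrite author's own statement) =====
-- stated objective: faster
-- what changed: Instead of re-inserting into a sorted list (insort) and re-scanning it for the first gap after every element, B keeps a count dict plus an incrementally advanced smallest-missing index (mex) and the smallest duplicated index, from which the end of the contiguous prefix is read off in O(1) amortized per step.
import Mathlib
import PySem

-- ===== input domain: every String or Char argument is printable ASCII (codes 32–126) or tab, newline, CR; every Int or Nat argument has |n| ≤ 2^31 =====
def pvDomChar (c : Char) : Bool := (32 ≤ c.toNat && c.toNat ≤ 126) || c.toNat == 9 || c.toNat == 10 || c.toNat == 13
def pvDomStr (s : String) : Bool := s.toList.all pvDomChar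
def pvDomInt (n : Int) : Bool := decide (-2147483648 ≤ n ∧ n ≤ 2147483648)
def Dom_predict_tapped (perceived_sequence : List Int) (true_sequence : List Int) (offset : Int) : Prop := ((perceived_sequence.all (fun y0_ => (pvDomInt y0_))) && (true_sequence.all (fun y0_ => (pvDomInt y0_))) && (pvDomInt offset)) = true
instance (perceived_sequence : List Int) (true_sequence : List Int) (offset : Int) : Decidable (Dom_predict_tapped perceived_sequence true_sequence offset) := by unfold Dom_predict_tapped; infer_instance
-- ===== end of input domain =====

-- B replaces A's per-step insort + rescan with a count dict, an incremental smallest-missing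
-- index and the smallest duplicated index, for an asymptotically faster exact computation.

-- ===== PORT A =====

-- bisect.insort: insert x into the sorted list l, to the right of entries equal to x
def pvInsort (l : List Int) (x : Int) : List Int :=
  match l with
  | [] => [x]
  | y :: ys => if x < y then x :: y :: ys else y :: pvInsort ys x

-- the 'for i in range(1, len(index_list))' scan of continuous_check; a is index_list[i-1]
def pvChain (offset : Int) (a : Int) : List Int → Option Int
  | [] => some (a + offset)
  | b :: r => if b ≠ a + 1 then some (a + offset) else pvChain offset b r

-- continuous_check; A only calls it on a nonempty list (it has just inserted an element),
-- so the [] branch (where Python's index_list[0] would raise IndexError) is unreachable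
def pvContCheck (offset : Int) (l : List Int) : Option Int :=
  match l with
  | [] => none
  | a :: r => if a ≠ 0 then none else pvChain offset a r

-- {number: index for index, number in enumerate(perceived_sequence)}
def pvIndexDict (ps : List Int) : PySem.Dict Int Int :=
  (PySem.List.enumerate ps 0).foldl (fun d p => d.insert p.2 p.1) PySem.Dict.empty

-- one iteration of A's 'for number in true_sequence' loop; state = (sequence_index, tapped).
-- index_dict[number] raises KeyError when number is absent: excluded by Pre_ (getD's default is never used there)
def pvStepA (idx : PySem.Dict Int Int) (offset : Int)
    (st : List Int × PySem.Set Int) (number : Int) : List Int × PySem.Set Int :=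
  let l := pvInsort st.1 (idx.getD number 0)
  match pvContCheck offset l with
  | some v => (l, if v ≠ 0 then PySem.Set.add st.2 v else st.2)
  | none => (l, st.2)

def predict_tapped (perceived_sequence : List Int) (true_sequence : List Int) (offset : Int) : List Int :=
  let idx := pvIndexDict perceived_sequence
  let st := true_sequence.foldl (pvStepA idx offset) ([], PySem.Set.empty)
  PySem.List.sorted st.2 (fun x => x) false

-- ===== PORT B =====

-- Source B's 'while cnt.get(mex, 0): mex += 1'; fuel = len(perceived_sequence)+1 always
-- suffices because every stored index is < len(perceived_sequence)
def pvBumpMex (cnt : PySem.Dict Int Int) : Nat → Int → Int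
  | 0, m => m
  | f + 1, m => if cnt.getD m 0 ≠ 0 then pvBumpMex cnt f (m + 1) else m

-- one iteration of Source B's loop; state = (cnt, mex, sdup, tapped)
def pvStepB (idx : PySem.Dict Int Int) (fuel : Nat) (offset : Int)
    (st : PySem.Dict Int Int × Int × Option Int × PySem.Set Int) (number : Int) :
    PySem.Dict Int Int × Int × Option Int × PySem.Set Int :=
  let i := idx.getD number 0
  let c := st.1.getD i 0 + 1
  let cnt := st.1.insert i c
  let sdup := if c = 2 then
      match st.2.2.1 with
      | none => some i
      | some d => if i < d then some i else some d
    else st.2.2.1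
  let mex := pvBumpMex cnt fuel st.2.1
  let tapped :=
    if cnt.getD 0 0 ≠ 0 then
      let t := (match sdup with | none => mex - 1 | some d => min (mex - 1) d) + offset
      if t ≠ 0 then PySem.Set.add st.2.2.2 t else st.2.2.2
    else st.2.2.2
  (cnt, mex, sdup, tapped)

def predict_tapped_alt (perceived_sequence : List Int) (true_sequence : List Int) (offset : Int) : List Int :=
  let idx := pvIndexDict perceived_sequence
  let st := true_sequence.foldl (pvStepB idx (perceived_sequence.length + 1) offset)
    (PySem.Dict.empty, 0, none, PySem.Set.empty)
  PySem.List.sorted st.2.2.2 (fun x => x) false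

-- ===== PRECONDITION & SPEC =====
-- Pre_ excludes exactly the inputs on which A raises KeyError: some element of
-- true_sequence that is not a key of index_dict, i.e. not in perceived_sequence.
def Pre_predict_tapped (perceived_sequence : List Int) (true_sequence : List Int) (offset : Int) : Prop :=
  ∀ x ∈ true_sequence, x ∈ perceived_sequence
instance (perceived_sequence : List Int) (true_sequence : List Int) (offset : Int) : Decidable (Pre_predict_tapped perceived_sequence true_sequence offset) := by unfold Pre_predict_tapped; infer_instance

def pvWitness_predict_tapped : List Int × List Int × Int := ([5, 7, 9], [7, 5, 9, 7], 1)

def Spec_predict_tapped (perceived_sequence : List Int) (true_sequence : List Int) (offset : Int) (out : List Int) : Prop := out = predict_tapped_alt perceived_sequence true_sequence offset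
instance (perceived_sequence : List Int) (true_sequence : List Int) (offset : Int) (out : List Int) : Decidable (Spec_predict_tapped perceived_sequence true_sequence offset out) := by unfold Spec_predict_tapped; infer_instance

-- ===== CLAIM (what is proved, stated in full; the proofs are below) =====
def Claim_equal_predict_tapped : Prop := ∀ (perceived_sequence : List Int) (true_sequence : List Int) (offset : Int), Dom_predict_tapped perceived_sequence true_sequence offset → Pre_predict_tapped perceived_sequence true_sequence offset → Spec_predict_tapped perceived_sequence true_sequence offset (predict_tapped perceived_sequence true_sequence offset)


-- ===== LEMMAS AND PROOFS =====

-- "sdup describes the counts of l": no duplicate at all, or d is the smallest duplicated value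
def pvDupSpec (l : List Int) : Option Int → Prop
  | none => ∀ k, l.count k ≤ 1
  | some d => 2 ≤ l.count d ∧ ∀ k, k < d → l.count k ≤ 1

-- same, with a lower bound on the duplicated value (used during the induction)
def pvDupSpecLB (a : Int) (l : List Int) : Option Int → Prop
  | none => ∀ k, l.count k ≤ 1
  | some d => a ≤ d ∧ 2 ≤ l.count d ∧ ∀ k, k < d → l.count k ≤ 1

-- the value Source B reads off: min(mex - 1, sdup)
def pvDupVal (M : Int) : Option Int → Int
  | none => M - 1
  | some d => min (M - 1) d

lemma pvInsort_perm (l : List Int) (x : Int) : (pvInsort l x).Perm (x :: l) := by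
  induction l with
  | nil => simp [pvInsort]
  | cons z zs ih =>
      simp only [pvInsort]
      split_ifs with h
      · exact List.Perm.refl _
      · exact (ih.cons z).trans (List.Perm.swap x z zs)

lemma count_pvInsort (l : List Int) (x y : Int) :
    (pvInsort l x).count y = l.count y + if y = x then 1 else 0 := by
  rw [List.Perm.count_eq (pvInsort_perm l x), List.count_cons]
  by_cases h : y = x
  · simp [h]
  · simp [h, Ne.symm h]

lemma mem_pvInsort (l : List Int) (x y : Int) : y ∈ pvInsort l x ↔ y = x ∨ y ∈ l := by
  rw [List.Perm.mem_iff (pvInsort_perm l x), List.mem_cons]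

lemma pairwise_pvInsort (l : List Int) (x : Int) (h : l.Pairwise (· ≤ ·)) :
    (pvInsort l x).Pairwise (· ≤ ·) := by
  induction l with
  | nil => simp [pvInsort]
  | cons z zs ih =>
      rcases List.pairwise_cons.1 h with ⟨hz, hzs⟩
      simp only [pvInsort]
      split_ifs with hlt
      · refine List.pairwise_cons.2 ⟨?_, h⟩
        intro b hb
        rcases List.mem_cons.1 hb with rfl | hb
        · omega
        · exact le_trans (le_of_lt hlt) (hz _ hb)
      · refine List.pairwise_cons.2 ⟨?_, ih hzs⟩
        intro b hb
        rcases (mem_pvInsort zs x b).1 hb with rfl | hb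
        · omega
        · exact hz _ hb

lemma pvInsort_ne_nil (l : List Int) (x : Int) : pvInsort l x ≠ [] := by
  cases l with
  | nil => simp [pvInsort]
  | cons z zs => simp only [pvInsort]; split_ifs <;> simp

-- characterisation of the continuous_check scan on a sorted list, in terms of the
-- smallest missing value M and the (optional) smallest duplicated value D of the counts
lemma pvChain_eq (offset : Int) (l : List Int) : ∀ (a M : Int) (D : Option Int),
    (a :: l).Pairwise (· ≤ ·) →
    a ≤ M →
    (∀ j, a ≤ j → j < M → (a :: l).count j ≠ 0) →
    (a :: l).count M = 0 →
    pvDupSpecLB a (a :: l) D →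
    pvChain offset a l = some (pvDupVal M D + offset) := by
  induction l with
  | nil =>
      intro a M D _ haM hlo hM hD
      have hca : ([a] : List Int).count a = 1 := by simp
      have hMa : M ≠ a := by intro h; rw [h, hca] at hM; omega
      have hM1 : M = a + 1 := by
        by_contra hne
        have h2 : a + 1 < M := by omega
        have h3 := hlo (a + 1) (by omega) h2
        apply h3
        apply List.count_eq_zero.2
        intro hmem
        rcases List.mem_cons.1 hmem with h | h
        · omega
        · simp at h
      cases D with
      | none => simp [pvChain, pvDupVal, hM1]
      | some d =>
          exfalso
          simp only [pvDupSpecLB] at hD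
          obtain ⟨had, hd2, hdlo⟩ := hD
          have hcd : ([a] : List Int).count d ≤ 1 := by
            have := List.count_le_length (l := [a]) (a := d)
            simpa using this
          omega
  | cons b r ih =>
      intro a M D hp haM hlo hM hD
      rcases List.pairwise_cons.1 hp with ⟨hale, hbr⟩
      rcases List.pairwise_cons.1 hbr with ⟨hble, _⟩
      have hab : a ≤ b := hale b (by simp)
      by_cases hb : b = a + 1
      · -- consecutive: a occurs exactly once, recurse on the tail
        have hna : a ∉ b :: r := by
          intro hmem
          rcases List.mem_cons.1 hmem with h | h
          · omega
          · have := hble a h; omega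
        have hcount_eq : ∀ j, j ≠ a → (b :: r).count j = (a :: b :: r).count j := by
          intro j hj
          have h1 : (a :: b :: r).count j = (b :: r).count j + if j = a then 1 else 0 := by
            rw [List.count_cons]
            by_cases h : j = a
            · simp [h]
            · simp [h, Ne.symm h]
          rw [h1, if_neg hj]
          simp
        have hca : (a :: b :: r).count a = 1 := by
          rw [List.count_cons, List.count_eq_zero.2 hna]
          simp
        have hMa : M ≠ a := by intro h; rw [h, hca] at hM; omega
        have step : pvChain offset a (b :: r) = pvChain offset b r := by
          simp [pvChain, hb]
        rw [step]
        apply ih b M D hbr (by omega)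
        · intro j hbj hjM
          rw [hcount_eq j (by omega)]
          exact hlo j (by omega) hjM
        · rw [hcount_eq M hMa]; exact hM
        · cases D with
          | none =>
              simp only [pvDupSpecLB] at hD ⊢
              intro k
              by_cases hk : k = a
              · subst hk; rw [List.count_eq_zero.2 hna]; omega
              · rw [hcount_eq k hk]; exact hD k
          | some d =>
              simp only [pvDupSpecLB] at hD ⊢
              obtain ⟨had, hd2, hdlo⟩ := hD
              have hda : d ≠ a := by intro h; rw [h, hca] at hd2; omega
              refine ⟨by omega, by rw [hcount_eq d hda]; exact hd2, ?_⟩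
              intro k hk
              by_cases hka : k = a
              · subst hka; rw [List.count_eq_zero.2 hna]; omega
              · rw [hcount_eq k hka]; exact hdlo k hk
      · -- gap or duplicate at the head: the scan stops, the result is a + offset
        have step : pvChain offset a (b :: r) = some (a + offset) := by
          simp [pvChain, hb]
        rw [step]
        have hca1 : (a :: b :: r).count a ≠ 0 := by
          rw [List.count_cons]
          simp
        have hMne : M ≠ a := by intro h; rw [h] at hM; exact hca1 hM
        have haM' : a < M := by omega
        by_cases hba : b = a
        · -- duplicate of a: D must be some a
          subst hba
          have hca2 : 2 ≤ (b :: b :: r).count b := by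
            rw [List.count_cons, List.count_cons]
            simp
          cases D with
          | none =>
              exfalso
              simp only [pvDupSpecLB] at hD
              have := hD b
              omega
          | some d =>
              simp only [pvDupSpecLB] at hD
              obtain ⟨had, hd2, hdlo⟩ := hD
              have hda : d = b := by
                by_contra hne
                have hlt : b < d := by omega
                have := hdlo b hlt
                omega
              subst hda
              simp only [pvDupVal, Option.some.injEq]
              omega
        · -- gap: b ≥ a + 2, so a+1 is missing and M = a + 1
          have hb2 : a + 2 ≤ b := by omega
          have hna1 : (a + 1) ∉ (a :: b :: r) := by
            intro hmem
            rcases List.mem_cons.1 hmem with h | h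
            · omega
            · rcases List.mem_cons.1 h with h | h
              · omega
              · have := hble (a + 1) h; omega
          have hcnt1 : (a :: b :: r).count (a + 1) = 0 := List.count_eq_zero.2 hna1
          have hM1 : M = a + 1 := by
            by_contra hne
            have hlt : a + 1 < M := by omega
            exact hlo (a + 1) (by omega) hlt hcnt1
          have hna : a ∉ b :: r := by
            intro hmem
            rcases List.mem_cons.1 hmem with h | h
            · omega
            · have := hble a h; omega
          have hca : (a :: b :: r).count a = 1 := by
            rw [List.count_cons, List.count_eq_zero.2 hna]
            simp
          cases D with
          | none => simp [pvDupVal, hM1]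
          | some d =>
              simp only [pvDupSpecLB] at hD
              obtain ⟨had, hd2, hdlo⟩ := hD
              have hda : d ≠ a := by intro h; rw [h, hca] at hd2; omega
              simp only [pvDupVal, Option.some.injEq]
              omega

lemma pvContCheck_eq (offset : Int) (l : List Int) (M : Int) (D : Option Int)
    (hs : l.Pairwise (· ≤ ·)) (hnn : ∀ x ∈ l, 0 ≤ x) (hne : l ≠ [])
    (hM0 : 0 ≤ M) (hlo : ∀ j, 0 ≤ j → j < M → l.count j ≠ 0) (hM : l.count M = 0)
    (hD : pvDupSpec l D) :
    pvContCheck offset l =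
      if l.count 0 = 0 then none else some (pvDupVal M D + offset) := by
  cases l with
  | nil => exact absurd rfl hne
  | cons a r =>
      rcases List.pairwise_cons.1 hs with ⟨hale, _⟩
      by_cases h0 : (a :: r).count 0 = 0
      · have ha : a ≠ 0 := by
          intro h
          subst h
          rw [List.count_cons] at h0
          simp at h0
        rw [if_pos h0]
        simp [pvContCheck, ha]
      · rw [if_neg h0]
        have h0m : (0 : Int) ∈ a :: r := by
          by_contra hnm
          exact h0 (List.count_eq_zero.2 hnm)
        have ha0 : a = 0 := by
          have h1 : 0 ≤ a := hnn a (by simp)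
          rcases List.mem_cons.1 h0m with h | h
          · omega
          · have := hale 0 h; omega
        subst ha0
        have hstep : pvContCheck offset (0 :: r) = pvChain offset 0 r := by
          simp [pvContCheck]
        rw [hstep]
        apply pvChain_eq offset r 0 M D hs hM0 hlo hM
        cases D with
        | none => exact hD
        | some d =>
            simp only [pvDupSpec] at hD
            simp only [pvDupSpecLB]
            obtain ⟨hd2, hdlo⟩ := hD
            have hdm : d ∈ (0 : Int) :: r := List.count_pos_iff.1 (by omega)
            exact ⟨hnn d hdm, hd2, hdlo⟩

lemma pvBumpMex_spec (cnt : PySem.Dict Int Int) : ∀ (fuel : Nat) (m : Int),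
    (∃ j : Int, m ≤ j ∧ j < m + fuel ∧ cnt.getD j 0 = 0) →
    m ≤ pvBumpMex cnt fuel m ∧
    (∀ j, m ≤ j → j < pvBumpMex cnt fuel m → cnt.getD j 0 ≠ 0) ∧
    cnt.getD (pvBumpMex cnt fuel m) 0 = 0 := by
  intro fuel
  induction fuel with
  | zero =>
      intro m ⟨j, h1, h2, _⟩
      exfalso
      push_cast at h2
      omega
  | succ f ih =>
      intro m ⟨j, h1, h2, h3⟩
      by_cases hm : cnt.getD m 0 ≠ 0
      · have hjm : j ≠ m := by intro h; rw [h] at h3; exact hm h3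
        have step : pvBumpMex cnt (f + 1) m = pvBumpMex cnt f (m + 1) := by
          simp [pvBumpMex, hm]
        obtain ⟨ih1, ih2, ih3⟩ := ih (m + 1) ⟨j, by omega, by push_cast at h2 ⊢; omega, h3⟩
        rw [step]
        refine ⟨by omega, ?_, ih3⟩
        intro k hk1 hk2
        by_cases hkm : k = m
        · subst hkm; exact hm
        · exact ih2 k (by omega) hk2
      · push_neg at hm
        have step : pvBumpMex cnt (f + 1) m = m := by simp [pvBumpMex, hm]
        rw [step]
        exact ⟨le_refl m, by intro k hh1 hh2; omega, hm⟩

lemma pvIndexDict_append (qs : List Int) (y : Int) :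
    pvIndexDict (qs ++ [y]) = (pvIndexDict qs).insert y (qs.length : Int) := by
  simp [pvIndexDict, PySem.List.enumerate_append, List.foldl_append, PySem.List.enumerate_cons,
    PySem.List.enumerate_nil]

lemma pvIndexDict_getD_mem (ps : List Int) (x : Int) (hx : x ∈ ps) :
    0 ≤ (pvIndexDict ps).getD x 0 ∧ (pvIndexDict ps).getD x 0 < (ps.length : Int) := by
  induction ps using List.reverseRecOn with
  | nil => simp at hx
  | append_singleton qs y ih =>
      rw [pvIndexDict_append, PySem.Dict.getD_insert]
      by_cases hxy : x = y
      · rw [if_pos hxy]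
        constructor
        · exact_mod_cast Nat.zero_le _
        · simp only [List.length_append, List.length_cons, List.length_nil]
          push_cast
          omega
      · rw [if_neg hxy]
        have hxq : x ∈ qs := by
          rcases List.mem_append.1 hx with h | h
          · exact h
          · simp at h; exact absurd h hxy
        obtain ⟨h1, h2⟩ := ih hxq
        refine ⟨h1, ?_⟩
        simp only [List.length_append, List.length_cons, List.length_nil]
        push_cast
        omega

-- the coupling invariant between A's state (sorted index list, tapped) and
-- B's state (count dict, mex, smallest duplicate, tapped)
def pvInv (psLen : Int) (stA : List Int × PySem.Set Int)
    (stB : PySem.Dict Int Int × Int × Option Int × PySem.Set Int) : Prop :=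
  stA.1.Pairwise (· ≤ ·) ∧
  (∀ x ∈ stA.1, 0 ≤ x ∧ x < psLen) ∧
  (∀ k, stB.1.getD k 0 = (stA.1.count k : Int)) ∧
  0 ≤ stB.2.1 ∧
  (∀ j, 0 ≤ j → j < stB.2.1 → stA.1.count j ≠ 0) ∧
  stA.1.count stB.2.1 = 0 ∧
  pvDupSpec stA.1 stB.2.2.1 ∧
  stA.2 = stB.2.2.2

lemma pvStep_inv (ps : List Int) (offset : Int) (number : Int) (hnum : number ∈ ps)
    (stA : List Int × PySem.Set Int)
    (stB : PySem.Dict Int Int × Int × Option Int × PySem.Set Int)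
    (hinv : pvInv (ps.length : Int) stA stB) :
    pvInv (ps.length : Int)
      (pvStepA (pvIndexDict ps) offset stA number)
      (pvStepB (pvIndexDict ps) (ps.length + 1) offset stB number) := by
  obtain ⟨hsorted, hbound, hcnt, hmex0, hmexlo, hmex, hsdup, htap⟩ := hinv
  obtain ⟨hi0, hilt⟩ := pvIndexDict_getD_mem ps number hnum
  set i := (pvIndexDict ps).getD number 0 with hi
  set l' := pvInsort stA.1 i with hl'
  have hc' : ∀ k, l'.count k = stA.1.count k + if k = i then 1 else 0 :=
    fun k => count_pvInsort stA.1 i k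
  have hsorted' : l'.Pairwise (· ≤ ·) := pairwise_pvInsort stA.1 i hsorted
  have hbound' : ∀ x ∈ l', 0 ≤ x ∧ x < (ps.length : Int) := by
    intro x hx
    rcases (mem_pvInsort stA.1 i x).1 hx with rfl | hx
    · exact ⟨hi0, hilt⟩
    · exact hbound x hx
  set cnt' := stB.1.insert i (stB.1.getD i 0 + 1) with hcnt'def
  have hcnt'' : ∀ k, cnt'.getD k 0 = (l'.count k : Int) := by
    intro k
    rw [hcnt'def, PySem.Dict.getD_insert]
    by_cases hk : k = i
    · rw [if_pos hk, hk, hcnt i, hc' i]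
      push_cast
      simp
    · rw [if_neg hk, hcnt k, hc' k]; simp [hk]
  set c := stB.1.getD i 0 + 1 with hc
  have hcval : c = (stA.1.count i : Int) + 1 := by rw [hc, hcnt i]
  set sdup' := (if c = 2 then
      match stB.2.2.1 with
      | none => some i
      | some d => if i < d then some i else some d
    else stB.2.2.1) with hsdup'def
  have hsdup' : pvDupSpec l' sdup' := by
    rw [hsdup'def]
    by_cases hc2 : c = 2
    · have hli : stA.1.count i = 1 := by omega
      have hl'i : l'.count i = 2 := by rw [hc' i]; simp [hli]
      rw [if_pos hc2]
      rcases hd : stB.2.2.1 with _ | d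
      · rw [hd] at hsdup
        simp only [pvDupSpec] at hsdup ⊢
        show 2 ≤ l'.count i ∧ ∀ k, k < i → l'.count k ≤ 1
        refine ⟨by omega, ?_⟩
        intro k hk
        rw [hc' k, if_neg (by omega)]
        exact hsdup k
      · rw [hd] at hsdup
        simp only [pvDupSpec] at hsdup
        obtain ⟨hd2, hdlo⟩ := hsdup
        show pvDupSpec l' (if i < d then some i else some d)
        by_cases hid : i < d
        · rw [if_pos hid]
          simp only [pvDupSpec]
          refine ⟨by omega, ?_⟩
          intro k hk
          rw [hc' k, if_neg (by omega)]
          exact hdlo k (by omega)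
        · rw [if_neg hid]
          push_neg at hid
          simp only [pvDupSpec]
          rcases eq_or_lt_of_le hid with heq | hlt
          · refine ⟨by rw [← heq] at hl'i; omega, ?_⟩
            intro k hk
            rw [hc' k, if_neg (by omega)]
            exact hdlo k hk
          · refine ⟨by rw [hc' d, if_neg (by omega)]; omega, ?_⟩
            intro k hk
            rw [hc' k]
            by_cases hki : k = i
            · exfalso; omega
            · rw [if_neg hki]; exact hdlo k hk
    · have hli : stA.1.count i ≠ 1 := by omega
      rw [if_neg hc2]
      rcases hd : stB.2.2.1 with _ | d
      · rw [hd] at hsdup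
        simp only [pvDupSpec] at hsdup ⊢
        intro k
        rw [hc' k]
        by_cases hki : k = i
        · rw [if_pos hki, hki]
          have h1 := hsdup i
          omega
        · rw [if_neg hki]; exact hsdup k
      · rw [hd] at hsdup
        simp only [pvDupSpec] at hsdup ⊢
        obtain ⟨hd2, hdlo⟩ := hsdup
        refine ⟨by rw [hc' d]; omega, ?_⟩
        intro k hk
        rw [hc' k]
        by_cases hki : k = i
        · rw [if_pos hki, hki]
          have h1 : stA.1.count i ≤ 1 := by
            have := hdlo i (by omega)
            exact this
          omega
        · rw [if_neg hki]; exact hdlo k hk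
  -- the new mex
  have hmexlen : stB.2.1 ≤ (ps.length : Int) := by
    by_contra h
    push_neg at h
    apply hmexlo (ps.length : Int) (by exact_mod_cast Nat.zero_le _) h
    apply List.count_eq_zero.2
    intro hmem
    have := hbound _ hmem
    omega
  have hlenfree : cnt'.getD (ps.length : Int) 0 = 0 := by
    rw [hcnt'' _]
    norm_cast
    apply List.count_eq_zero.2
    intro hmem
    have := hbound' _ hmem
    omega
  obtain ⟨hb1, hb2, hb3⟩ := pvBumpMex_spec cnt' (ps.length + 1) stB.2.1
    ⟨(ps.length : Int), hmexlen, by push_cast; omega, hlenfree⟩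
  set mex' := pvBumpMex cnt' (ps.length + 1) stB.2.1 with hmex'def
  have hmex'lo : ∀ j, 0 ≤ j → j < mex' → l'.count j ≠ 0 := by
    intro j hj0 hjm
    by_cases hjold : j < stB.2.1
    · have := hmexlo j hj0 hjold
      rw [hc' j]
      split_ifs <;> omega
    · push_neg at hjold
      have hne0 := hb2 j hjold hjm
      rw [hcnt'' j] at hne0
      intro hzero
      rw [hzero] at hne0
      simp at hne0
  have hmex'0 : (0 : Int) ≤ mex' := le_trans hmex0 hb1
  have hmex' : l'.count mex' = 0 := by
    have h := hb3
    rw [hcnt'' _] at h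
    exact_mod_cast h
  -- both steps written out as explicit tuples
  have hA : pvStepA (pvIndexDict ps) offset stA number =
      (l', match pvContCheck offset l' with
           | some v => if v ≠ 0 then PySem.Set.add stA.2 v else stA.2
           | none => stA.2) := by
    show (match pvContCheck offset l' with
          | some v => (l', if v ≠ 0 then PySem.Set.add stA.2 v else stA.2)
          | none => (l', stA.2)) = _
    cases pvContCheck offset l' <;> rfl
  have hB : pvStepB (pvIndexDict ps) (ps.length + 1) offset stB number =
      (cnt', mex', sdup',
       if cnt'.getD 0 0 ≠ 0 then
         (if (pvDupVal mex' sdup' + offset) ≠ 0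
          then PySem.Set.add stB.2.2.2 (pvDupVal mex' sdup' + offset)
          else stB.2.2.2)
       else stB.2.2.2) := rfl
  have hcheck := pvContCheck_eq offset l' mex' sdup' hsorted'
    (fun x hx => (hbound' x hx).1) (pvInsort_ne_nil stA.1 i) hmex'0 hmex'lo hmex' hsdup'
  rw [hA, hB]
  refine ⟨hsorted', hbound', hcnt'', hmex'0, hmex'lo, hmex', hsdup', ?_⟩
  -- the tapped sets stay equal: both sides add the same element, or none
  show (match pvContCheck offset l' with
        | some v => if v ≠ 0 then PySem.Set.add stA.2 v else stA.2
        | none => stA.2) = _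
  rw [hcheck]
  by_cases h0 : l'.count 0 = 0
  · rw [if_pos h0]
    have hB0 : ¬ cnt'.getD 0 0 ≠ 0 := by rw [hcnt'' 0]; simp [h0]
    simp only [if_neg hB0]
    exact htap
  · rw [if_neg h0]
    have hB0 : cnt'.getD 0 0 ≠ 0 := by
      rw [hcnt'' 0]
      simpa using h0
    simp only [if_pos hB0, htap]

lemma pvFold_inv (ps : List Int) (offset : Int) : ∀ (ts : List Int)
    (stA : List Int × PySem.Set Int)
    (stB : PySem.Dict Int Int × Int × Option Int × PySem.Set Int),
    (∀ x ∈ ts, x ∈ ps) → pvInv (ps.length : Int) stA stB →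
    pvInv (ps.length : Int)
      (ts.foldl (pvStepA (pvIndexDict ps) offset) stA)
      (ts.foldl (pvStepB (pvIndexDict ps) (ps.length + 1) offset) stB) := by
  intro ts
  induction ts with
  | nil => intro stA stB _ h; simpa using h
  | cons x xs ih =>
      intro stA stB hmem hinv
      simp only [List.foldl_cons]
      exact ih _ _ (fun y hy => hmem y (by simp [hy]))
        (pvStep_inv ps offset x (hmem x (by simp)) stA stB hinv)

-- ===== VERDICT (by name: the statement is the Claim_ definition above) =====
theorem predict_tapped_spec : Claim_equal_predict_tapped := by
  intro ps ts offset _ hpre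
  have hinv0 : pvInv (ps.length : Int) ([], PySem.Set.empty)
      (PySem.Dict.empty, 0, none, PySem.Set.empty) := by
    refine ⟨List.Pairwise.nil, by simp, ?_, le_refl 0, ?_, by simp, ?_, rfl⟩
    · intro k; simp [PySem.Dict.getD_empty]
    · intro j h1 h2
      exact absurd h2 (not_lt.2 h1)
    · simp only [pvDupSpec]; intro k; simp
  obtain ⟨_, _, _, _, _, _, _, htap⟩ :=
    pvFold_inv ps offset ts ([], PySem.Set.empty)
      (PySem.Dict.empty, 0, none, PySem.Set.empty) hpre hinv0
  show predict_tapped ps ts offset = predict_tapped_alt ps ts offset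
  show PySem.List.sorted (ts.foldl (pvStepA (pvIndexDict ps) offset) ([], PySem.Set.empty)).2
        (fun x => x) false
     = PySem.List.sorted (ts.foldl (pvStepB (pvIndexDict ps) (ps.length + 1) offset)
        (PySem.Dict.empty, 0, none, PySem.Set.empty)).2.2.2 (fun x => x) false
  rw [htap]
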